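-- pv_equiv track=rewrite | github.com/Intership-Germany/DinnerHopping-s-Website | backend/app/services/matching/units.py | group_units_in_triads
-- ===== SOURCE A (Python) =====
-- from typing import Dict, List, Optional, Tuple
--
-- def group_units_in_triads(units: List[dict]) -> List[List[dict]]:
--     duos = [unit for unit in units if int(unit.get('size') or 1) >= 2]
--     solos = [unit for unit in units if int(unit.get('size') or 1) == 1]
--     groups: List[List[dict]] = []
--     while len(duos) >= 3:
--         groups.append([duos.pop(0), duos.pop(0), duos.pop(0)])
--     while len(duos) >= 1 and len(solos) >= 2:
--         groups.append([duos.pop(0), solos.pop(0), solos.pop(0)])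
--     while len(duos) >= 2 and len(solos) >= 1:
--         groups.append([duos.pop(0), duos.pop(0), solos.pop(0)])
--     while len(solos) >= 3:
--         groups.append([solos.pop(0), solos.pop(0), solos.pop(0)])
--     remaining = duos + solos
--     if remaining:
--         while remaining:
--             group: List[dict] = []
--             for _ in range(3):
--                 if remaining:
--                     group.append(remaining.pop(0))
--             if group:
--                 groups.append(group)
--     return groups
-- ===== SOURCE B (Python) =====
-- from typing import Dict, List, Optional, Tuple
--
-- def _chunk(xs, k):
--     return [xs[i:i + k] for i in range(0, len(xs), k)]
--
-- def group_units_in_triads(units: List[dict]) -> List[List[dict]]: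
--     duos = [unit for unit in units if int(unit.get('size') or 1) >= 2]
--     solos = [unit for unit in units if int(unit.get('size') or 1) == 1]
--     # phase 1: triads of duos, count computed arithmetically
--     n1 = len(duos) // 3
--     d1 = duos[3 * n1:]
--     # phase 2: one duo + two solos
--     n2 = min(len(d1), len(solos) // 2)
--     g2 = [[u] + p for u, p in zip(d1[:n2], _chunk(solos[:2 * n2], 2))]
--     d2, s2 = d1[n2:], solos[2 * n2:]
--     # phase 3: two duos + one solo
--     n3 = min(len(d2) // 2, len(s2))
--     g3 = [p + [x] for p, x in zip(_chunk(d2[:2 * n3], 2), s2[:n3])]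
--     d3, s3 = d2[2 * n3:], s2[n3:]
--     # phase 4: triads of solos, then the leftover tail chunked in up-to-3s
--     n4 = len(s3) // 3
--     return (_chunk(duos[:3 * n1], 3) + g2 + g3 + _chunk(s3[:3 * n4], 3)
--             + _chunk(d3 + s3[3 * n4:], 3))
-- ===== Notes on version B (the rewrite author's own statement) =====
-- stated objective: alternative
-- what changed: Replaced the four destructive pop-driven while loops and the leftover while/for loop by closed-form phase counts (len//3, two mins) with pure slicing and zipping: each phase's groups are built at once from slices, and the tail is chunked by a comprehension; no list mutation at all.
import Mathlib
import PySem

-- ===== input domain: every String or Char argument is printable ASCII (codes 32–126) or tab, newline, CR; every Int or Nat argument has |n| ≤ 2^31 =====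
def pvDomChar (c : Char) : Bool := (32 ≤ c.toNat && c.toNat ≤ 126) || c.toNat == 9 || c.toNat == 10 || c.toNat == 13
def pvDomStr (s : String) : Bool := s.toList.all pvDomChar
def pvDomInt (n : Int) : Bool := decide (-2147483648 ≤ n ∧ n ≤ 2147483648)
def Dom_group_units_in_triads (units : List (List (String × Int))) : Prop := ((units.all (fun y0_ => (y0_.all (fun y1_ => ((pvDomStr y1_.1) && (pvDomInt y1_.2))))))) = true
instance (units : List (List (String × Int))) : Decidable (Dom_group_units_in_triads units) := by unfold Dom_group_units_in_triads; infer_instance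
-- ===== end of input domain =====

-- B replaces A's four destructive pop(0)-driven while loops by closed-form phase
-- counts with pure slicing/zipping (objective: alternative formulation, no mutation).

-- ===== PORT A =====
-- int(unit.get('size') or 1): first match in the assoc list; None or 0 falls back to 1
def pvSize (u : List (String × Int)) : Int :=
  match u.find? (fun p => p.1 == "size") with
  | none => 1
  | some p => if p.2 = 0 then 1 else p.2

-- while len(duos) >= 3: groups.append([pop,pop,pop])
def pvLoopA1 : List (List (String × Int)) → List (List (List (String × Int))) →
    List (List (String × Int)) × List (List (List (String × Int)))
  | a :: b :: c :: rest, gs => pvLoopA1 rest (gs ++ [[a, b, c]])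
  | d, gs => (d, gs)

-- while len(duos) >= 1 and len(solos) >= 2
def pvLoopA2 : List (List (String × Int)) → List (List (String × Int)) →
    List (List (List (String × Int))) →
    List (List (String × Int)) × List (List (String × Int)) × List (List (List (String × Int)))
  | a :: dr, x :: y :: sr, gs => pvLoopA2 dr sr (gs ++ [[a, x, y]])
  | d, s, gs => (d, s, gs)

-- while len(duos) >= 2 and len(solos) >= 1
def pvLoopA3 : List (List (String × Int)) → List (List (String × Int)) →
    List (List (List (String × Int))) →
    List (List (String × Int)) × List (List (String × Int)) × List (List (List (String × Int)))
  | a :: b :: dr, x :: sr, gs => pvLoopA3 dr sr (gs ++ [[a, b, x]])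
  | d, s, gs => (d, s, gs)

-- while len(solos) >= 3
def pvLoopA4 : List (List (String × Int)) → List (List (List (String × Int))) →
    List (List (String × Int)) × List (List (List (String × Int)))
  | a :: b :: c :: rest, gs => pvLoopA4 rest (gs ++ [[a, b, c]])
  | s, gs => (s, gs)

-- while remaining: pop up to 3 into a group and append it
def pvLoopRem : List (List (String × Int)) → List (List (List (String × Int))) →
    List (List (List (String × Int)))
  | [], gs => gs
  | a :: rest, gs => pvLoopRem (rest.drop 2) (gs ++ [a :: rest.take 2])
termination_by r _ => r.length
decreasing_by simp

def group_units_in_triads (units : List (List (String × Int))) : List (List (List (String × Int))) :=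
  let duos := units.filter (fun u => pvSize u ≥ 2)
  let solos := units.filter (fun u => pvSize u = 1)
  let r1 := pvLoopA1 duos []
  let r2 := pvLoopA2 r1.1 solos r1.2
  let r3 := pvLoopA3 r2.1 r2.2.1 r2.2.2
  let r4 := pvLoopA4 r3.2.1 r3.2.2
  -- 'if remaining:' is redundant (the inner loop does nothing on []); 'if group:' is always true
  pvLoopRem (r3.1 ++ r4.1) r4.2

-- ===== PORT B =====
-- _chunk(xs, 3) and _chunk(xs, 2)
def pvChunk3 {α : Type} : List α → List (List α)
  | [] => []
  | a :: rest => (a :: rest.take 2) :: pvChunk3 (rest.drop 2)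
termination_by r => r.length
decreasing_by simp

def pvChunk2 {α : Type} : List α → List (List α)
  | [] => []
  | a :: rest => (a :: rest.take 1) :: pvChunk2 (rest.drop 1)
termination_by r => r.length
decreasing_by simp

def group_units_in_triads_alt (units : List (List (String × Int))) : List (List (List (String × Int))) :=
  let duos := units.filter (fun u => pvSize u ≥ 2)
  let solos := units.filter (fun u => pvSize u = 1)
  let n1 := duos.length / 3
  let d1 := duos.drop (3 * n1)
  let n2 := min d1.length (solos.length / 2)
  let g2 := List.zipWith (fun u p => u :: p) (d1.take n2) (pvChunk2 (solos.take (2 * n2)))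
  let d2 := d1.drop n2
  let s2 := solos.drop (2 * n2)
  let n3 := min (d2.length / 2) s2.length
  let g3 := List.zipWith (fun p x => p ++ [x]) (pvChunk2 (d2.take (2 * n3))) (s2.take n3)
  let d3 := d2.drop (2 * n3)
  let s3 := s2.drop n3
  let n4 := s3.length / 3
  pvChunk3 (duos.take (3 * n1)) ++ g2 ++ g3 ++ pvChunk3 (s3.take (3 * n4)) ++
    pvChunk3 (d3 ++ s3.drop (3 * n4))

-- ===== PRECONDITION & SPEC =====
def Spec_group_units_in_triads (units : List (List (String × Int))) (out : List (List (List (String × Int)))) : Prop := out = group_units_in_triads_alt units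
instance (units : List (List (String × Int))) (out : List (List (List (String × Int)))) : Decidable (Spec_group_units_in_triads units out) := by unfold Spec_group_units_in_triads; infer_instance

-- ===== CLAIM (what is proved, stated in full; the proofs are below) =====
def Claim_equal_group_units_in_triads : Prop := ∀ (units : List (List (String × Int))), Dom_group_units_in_triads units → Spec_group_units_in_triads units (group_units_in_triads units)

-- ===== LEMMAS AND PROOFS =====

theorem pvLoopA1_eq : ∀ (d : List (List (String × Int))) (gs : List (List (List (String × Int)))),
    pvLoopA1 d gs = (d.drop (3 * (d.length / 3)), gs ++ pvChunk3 (d.take (3 * (d.length / 3)))) := by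
  intro d gs
  induction d, gs using pvLoopA1.induct with
  | case1 a b c rest gs ih =>
      have h3 : 3 * ((a :: b :: c :: rest).length / 3) = 3 * (rest.length / 3) + 3 := by
        simp; omega
      rw [pvLoopA1, ih, h3]
      simp [pvChunk3, List.take_succ_cons, List.drop_succ_cons]
  | case2 d gs h1 =>
      rcases d with _ | ⟨a, _ | ⟨b, _ | ⟨c, rest⟩⟩⟩
      · simp [pvLoopA1, pvChunk3]
      · simp [pvLoopA1, pvChunk3]
      · simp [pvLoopA1, pvChunk3]
      · exact (h1 a b c rest rfl).elim

theorem pvLoopA2_eq : ∀ (d s : List (List (String × Int))) (gs : List (List (List (String × Int)))),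
    pvLoopA2 d s gs =
      (d.drop (min d.length (s.length / 2)),
       s.drop (2 * min d.length (s.length / 2)),
       gs ++ List.zipWith (fun u p => u :: p) (d.take (min d.length (s.length / 2)))
         (pvChunk2 (s.take (2 * min d.length (s.length / 2))))) := by
  intro d s gs
  induction d, s, gs using pvLoopA2.induct with
  | case1 a dr x y sr gs ih =>
      have hm : min (a :: dr).length ((x :: y :: sr).length / 2)
          = min dr.length (sr.length / 2) + 1 := by simp; omega
      have h2 : 2 * (min dr.length (sr.length / 2) + 1) = 2 * min dr.length (sr.length / 2) + 2 := by
        omega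
      rw [pvLoopA2, ih, hm, h2]
      simp [pvChunk2, List.take_succ_cons, List.drop_succ_cons]
  | case2 d s gs h1 =>
      rcases d with _ | ⟨a, dr⟩
      · simp [pvLoopA2]
      · rcases s with _ | ⟨x, _ | ⟨y, sr⟩⟩
        · simp [pvLoopA2]
        · simp [pvLoopA2, pvChunk2]
        · exact (h1 a dr x y sr rfl rfl).elim

theorem pvLoopA3_eq : ∀ (d s : List (List (String × Int))) (gs : List (List (List (String × Int)))),
    pvLoopA3 d s gs =
      (d.drop (2 * min (d.length / 2) s.length),
       s.drop (min (d.length / 2) s.length),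
       gs ++ List.zipWith (fun p x => p ++ [x]) (pvChunk2 (d.take (2 * min (d.length / 2) s.length)))
         (s.take (min (d.length / 2) s.length))) := by
  intro d s gs
  induction d, s, gs using pvLoopA3.induct with
  | case1 a b dr x sr gs ih =>
      have hm : min ((a :: b :: dr).length / 2) (x :: sr).length
          = min (dr.length / 2) sr.length + 1 := by simp; omega
      have h2 : 2 * (min (dr.length / 2) sr.length + 1) = 2 * min (dr.length / 2) sr.length + 2 := by
        omega
      rw [pvLoopA3, ih, hm, h2]
      simp [pvChunk2, List.take_succ_cons, List.drop_succ_cons]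
  | case2 d s gs h1 =>
      rcases d with _ | ⟨a, _ | ⟨b, dr⟩⟩
      · simp [pvLoopA3]
      · simp [pvLoopA3, pvChunk2]
      · rcases s with _ | ⟨x, sr⟩
        · simp [pvLoopA3]
        · exact (h1 a b dr x sr rfl rfl).elim

theorem pvLoopA4_eq : ∀ (s : List (List (String × Int))) (gs : List (List (List (String × Int)))),
    pvLoopA4 s gs = (s.drop (3 * (s.length / 3)), gs ++ pvChunk3 (s.take (3 * (s.length / 3)))) := by
  intro s gs
  induction s, gs using pvLoopA4.induct with
  | case1 a b c rest gs ih =>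
      have h3 : 3 * ((a :: b :: c :: rest).length / 3) = 3 * (rest.length / 3) + 3 := by
        simp; omega
      rw [pvLoopA4, ih, h3]
      simp [pvChunk3, List.take_succ_cons, List.drop_succ_cons]
  | case2 s gs h1 =>
      rcases s with _ | ⟨a, _ | ⟨b, _ | ⟨c, rest⟩⟩⟩
      · simp [pvLoopA4, pvChunk3]
      · simp [pvLoopA4, pvChunk3]
      · simp [pvLoopA4, pvChunk3]
      · exact (h1 a b c rest rfl).elim

theorem pvLoopRem_eq : ∀ (r : List (List (String × Int))) (gs : List (List (List (String × Int)))),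
    pvLoopRem r gs = gs ++ pvChunk3 r := by
  intro r gs
  induction r, gs using pvLoopRem.induct with
  | case1 gs => rw [pvLoopRem]; simp [pvChunk3]
  | case2 a rest gs ih => rw [pvLoopRem, ih, pvChunk3]; simp

-- ===== VERDICT (by name: the statement is the Claim_ definition above) =====
theorem group_units_in_triads_spec : Claim_equal_group_units_in_triads := by
  intro units _
  unfold Spec_group_units_in_triads group_units_in_triads group_units_in_triads_alt
  simp only [pvLoopA1_eq, pvLoopA2_eq, pvLoopA3_eq, pvLoopA4_eq, pvLoopRem_eq]
  simp [List.append_assoc]
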